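-- pv_equiv track=rewrite | github.com/aibaellord/BaelTheLordOfAll-AI | core/thinking/extended_thinking.py | _extract_insight
-- ===== SOURCE A (Python) =====
-- from typing import Any, AsyncGenerator, Dict, List, Optional
--
-- def _extract_insight(analysis: str) -> Optional[str]:
--     """Extract key insight from analysis."""
--     # Look for insight markers
--     markers = ["therefore", "thus", "key insight", "importantly", "notably", "conclusion"]
--
--     for marker in markers:
--         if marker in analysis.lower():
--             idx = analysis.lower().find(marker)
--             # Extract sentence containing the marker
--             start = analysis.rfind(".", 0, idx) + 1
--             end = analysis.find(".", idx)
--             if end == -1: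
--                 end = len(analysis)
--             return analysis[start:end].strip()
--
--     # Fallback: last sentence
--     sentences = analysis.split(".")
--     if sentences:
--         return sentences[-2].strip() if len(sentences) > 1 else sentences[-1].strip()
--
--     return None
-- ===== SOURCE B (Python) =====
-- from typing import Optional
--
-- def _extract_insight(analysis: str) -> Optional[str]:
--     """Extract key insight from analysis."""
--     markers = ["therefore", "thus", "key insight", "importantly", "notably", "conclusion"]
--     sentences = analysis.split(".")
--     for marker in markers:
--         for sentence in sentences:
--             if marker in sentence.lower():
--                 return sentence.strip()
--     return sentences[-2].strip() if len(sentences) > 1 else sentences[-1].strip()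
-- ===== Notes on version B (the rewrite author's own statement) =====
-- stated objective: simpler
-- what changed: Instead of per-marker rfind/find index arithmetic to cut the sentence out of the raw string, B splits the text into sentences once and returns the first sentence (in marker order) whose lowercase form contains the marker; the fallback reuses the same list.
import Mathlib
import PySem

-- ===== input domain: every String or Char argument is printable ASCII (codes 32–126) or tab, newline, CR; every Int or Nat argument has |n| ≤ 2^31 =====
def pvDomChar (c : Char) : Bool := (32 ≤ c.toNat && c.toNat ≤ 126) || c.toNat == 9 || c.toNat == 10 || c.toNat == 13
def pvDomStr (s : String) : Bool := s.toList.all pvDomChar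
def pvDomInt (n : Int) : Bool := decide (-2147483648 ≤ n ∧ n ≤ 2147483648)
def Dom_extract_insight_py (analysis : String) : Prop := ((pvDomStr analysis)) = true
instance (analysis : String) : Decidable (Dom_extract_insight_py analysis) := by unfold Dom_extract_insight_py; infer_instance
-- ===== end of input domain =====

-- B replaces A's per-marker rfind/find index arithmetic by one split('.') into sentences,
-- returning the first sentence (in marker order) whose lowercase form contains the marker (objective: simpler).

-- ===== PORT A =====
-- the marker list of A (shared literal; both Pythons spell the same list)
def pvMarkers : List String :=
  ["therefore", "thus", "key insight", "importantly", "notably", "conclusion"]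

-- body of A's `for marker in markers:` iteration: `if marker in analysis.lower(): … return …`
def pvTryMarker (analysis : String) (marker : String) : Option String :=
  if PySem.Str.isIn marker (PySem.Str.lower analysis) then
    let idx := PySem.Str.find (PySem.Str.lower analysis) marker
    let start := PySem.Str.rfindFrom analysis "." 0 (some idx) + 1
    let e0 := PySem.Str.findFrom analysis "." idx
    let e := if e0 = -1 then PySem.Str.len analysis else e0
    some (PySem.Str.strip (PySem.Str.slice analysis (some start) (some e)))
  else none

def pvLoopA (analysis : String) : List String → Option String
  | [] => none
  | m :: ms =>
    match pvTryMarker analysis m with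
    | some r => some r
    | none => pvLoopA analysis ms

def extract_insight_py (analysis : String) : Option String :=
  match pvLoopA analysis pvMarkers with
  | some r => some r
  | none =>
    -- fallback: sentences = analysis.split(".")  (the separator "." is nonempty, so split? is `some`)
    let sentences := (PySem.Str.split? analysis ".").getD []
    if sentences ≠ [] then
      if sentences.length > 1 then (PySem.List.pyGet? sentences (-2)).map PySem.Str.strip
      else (PySem.List.pyGet? sentences (-1)).map PySem.Str.strip
    else none

-- ===== PORT B =====
-- B's inner loop: first sentence whose lowercase form contains the marker, stripped
def pvScanSentences (marker : String) : List String → Option String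
  | [] => none
  | s :: ss =>
    if PySem.Str.isIn marker (PySem.Str.lower s) then some (PySem.Str.strip s)
    else pvScanSentences marker ss

def pvLoopB (sentences : List String) : List String → Option String
  | [] => none
  | m :: ms =>
    match pvScanSentences m sentences with
    | some r => some r
    | none => pvLoopB sentences ms

def extract_insight_py_alt (analysis : String) : Option String :=
  let sentences := (PySem.Str.split? analysis ".").getD []
  match pvLoopB sentences pvMarkers with
  | some r => some r
  | none =>
    if sentences.length > 1 then (PySem.List.pyGet? sentences (-2)).map PySem.Str.strip
    else (PySem.List.pyGet? sentences (-1)).map PySem.Str.strip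

-- ===== PRECONDITION & SPEC =====
def Spec_extract_insight_py (analysis : String) (out : Option String) : Prop := out = extract_insight_py_alt analysis
instance (analysis : String) (out : Option String) : Decidable (Spec_extract_insight_py analysis out) := by unfold Spec_extract_insight_py; infer_instance

-- ===== CLAIM (what is proved, stated in full; the proofs are below) =====
def Claim_equal_extract_insight_py : Prop := ∀ (analysis : String), Dom_extract_insight_py analysis → Spec_extract_insight_py analysis (extract_insight_py analysis)

-- ===== LEMMAS AND PROOFS =====

-- index of the last '.' in a list (-1 if none); the value A's rfind(".", 0, idx) computes
def pvLastDot : List Char → ℤ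
  | [] => -1
  | c :: t => if pvLastDot t = -1 then (if c = '.' then 0 else -1) else 1 + pvLastDot t

-- Python's s.split(".") as a plain structural recursion
def pvSplit : List Char → List (List Char)
  | [] => [[]]
  | c :: t => if c = '.' then [] :: pvSplit t else (c :: (pvSplit t).headI) :: (pvSplit t).tail

-- B's inner scan at the character level (without the final strip)
def pvHit (mm : List Char) : List (List Char) → Option (List Char)
  | [] => none
  | p :: ps => if PySem.Chars.isIn mm (PySem.Chars.lower p) then some p else pvHit mm ps

-- A's slice [rfind('.',0,idx)+1 : find('.',idx) or len] at the character level (without the final strip)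
def pvExtract (cs : List Char) (j : ℕ) : List Char :=
  let st := (pvLastDot (cs.take j) + 1).toNat
  let e := if PySem.Chars.find (cs.drop j) ['.'] = -1 then cs.length
           else j + (PySem.Chars.find (cs.drop j) ['.']).toNat
  (cs.take e).drop st

-- A's per-marker step at the character level (without the final strip)
def pvCharA (mm cs : List Char) : Option (List Char) :=
  if PySem.Chars.isIn mm (PySem.Chars.lower cs) then
    some (pvExtract cs (PySem.Chars.find (PySem.Chars.lower cs) mm).toNat)
  else none

theorem pvSplit_ne_nil (cs : List Char) : pvSplit cs ≠ [] := by
  induction cs with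
  | nil => simp [pvSplit]
  | cons c t ih => simp only [pvSplit]; split_ifs <;> simp

theorem pvSplit_headI_tail (cs : List Char) : (pvSplit cs).headI :: (pvSplit cs).tail = pvSplit cs :=
  List.cons_head!_tail (by simpa using pvSplit_ne_nil cs)

theorem pvLastDot_bounds (l : List Char) : -1 ≤ pvLastDot l ∧ pvLastDot l < l.length := by
  induction l with
  | nil => simp [pvLastDot]
  | cons c t ih =>
    obtain ⟨ih1, ih2⟩ := ih
    simp only [pvLastDot, List.length_cons]
    split_ifs <;> exact ⟨by omega, by omega⟩

theorem pvLastDot_of_not_mem {l : List Char} (h : '.' ∉ l) : pvLastDot l = -1 := by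
  induction l with
  | nil => rfl
  | cons c t ih =>
    simp only [List.mem_cons, not_or] at h
    simp [pvLastDot, ih h.2, Ne.symm h.1]

theorem pvLastDot_append (a u : List Char) :
    pvLastDot (a ++ '.' :: u) =
      if pvLastDot u = -1 then (a.length : ℤ) else (a.length : ℤ) + 1 + pvLastDot u := by
  induction a with
  | nil => simp only [List.nil_append, pvLastDot, List.length_nil]; split_ifs <;> omega
  | cons c a' ih =>
    obtain ⟨hb1, hb2⟩ := pvLastDot_bounds u
    simp only [List.cons_append, pvLastDot, ih, List.length_cons]
    split_ifs with h1 h2 h3 <;> push_cast <;> try omega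
    all_goals exact h2.elim

theorem pvDotPrefix_iff (l : List Char) : (['.'] <+: l) ↔ l.head? = some '.' := by
  cases l with
  | nil => simp
  | cons c t => simp [List.cons_prefix_cons, eq_comm]

theorem pvLastDot_snoc (l : List Char) (c : Char) :
    pvLastDot (l ++ [c]) = if c = '.' then (l.length : ℤ) else pvLastDot l := by
  induction l with
  | nil => simp only [List.nil_append, pvLastDot, List.length_nil]; split_ifs <;> rfl
  | cons d t ih =>
    obtain ⟨hb1, hb2⟩ := pvLastDot_bounds t
    simp only [List.cons_append, pvLastDot, ih, List.length_cons]
    split_ifs with h1 h2 h3 <;> push_cast <;> try omega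
    all_goals exact h2.elim

theorem pvRfindGo_eq (s : List Char) (j : ℕ) :
    PySem.Chars.rfind.go s ['.'] j = pvLastDot (s.take (j + 1)) := by
  induction j with
  | zero =>
    rw [PySem.Chars.rfind.go.eq_def]
    cases s with
    | nil => rfl
    | cons c t =>
      simp only [List.isPrefixOf, List.take, pvLastDot, Bool.and_true]
      by_cases hc : c = '.'
      · simp [hc]
      · simp [hc, Ne.symm hc]
  | succ j ih =>
    rw [PySem.Chars.rfind.go.eq_def]
    simp only
    rw [List.take_add_one]
    cases hc : s[j + 1]? with
    | none =>
      have hlen : s.length ≤ j + 1 := List.getElem?_eq_none_iff.mp hc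
      rw [List.drop_eq_nil_of_le hlen]
      simpa using ih
    | some c =>
      obtain ⟨hlt, -⟩ := List.getElem?_eq_some_iff.mp hc
      have hhead : (s.drop (j + 1)).head? = some c := by rw [List.head?_drop, hc]
      have hpref : (['.'].isPrefixOf (s.drop (j + 1))) = (c == '.') := by
        rw [Bool.eq_iff_iff, List.isPrefixOf_iff_prefix, pvDotPrefix_iff, hhead, beq_iff_eq]
        simp
      simp only [Option.toList_some]
      rw [pvLastDot_snoc, List.length_take_of_le (by omega)]
      simp only [hpref]
      by_cases hcd : c = '.' <;> simp [hcd, ih]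

theorem pvRfind_eq_lastDot (s : List Char) : PySem.Chars.rfind s ['.'] = pvLastDot s := by
  rw [PySem.Chars.rfind, pvRfindGo_eq, List.take_of_length_le (by omega)]

theorem pvSplitGo_eq (l : List Char) : ∀ (fuel : ℕ) (cur : List Char)
    (acc : List (List Char)), l.length < fuel →
    PySem.Chars.splitOn.go ['.'] fuel l cur acc =
      acc.reverse ++ (cur.reverse ++ (pvSplit l).headI) :: (pvSplit l).tail := by
  induction l with
  | nil =>
    intro fuel cur acc hf
    obtain ⟨f, rfl⟩ : ∃ f, fuel = f + 1 := ⟨fuel - 1, by omega⟩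
    have hgo : PySem.Chars.splitOn.go ['.'] (f + 1) [] cur acc = (cur.reverse :: acc).reverse := rfl
    rw [hgo]
    simp [pvSplit]
  | cons c t ih =>
    intro fuel cur acc hf
    obtain ⟨f, rfl⟩ : ∃ f, fuel = f + 1 := ⟨fuel - 1, by omega⟩
    have hgo : PySem.Chars.splitOn.go ['.'] (f + 1) (c :: t) cur acc =
        if ['.'].isPrefixOf (c :: t) = true then
          PySem.Chars.splitOn.go ['.'] f (List.drop 1 (c :: t)) [] (cur.reverse :: acc)
        else PySem.Chars.splitOn.go ['.'] f t (c :: cur) acc := rfl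
    rw [hgo]
    simp only [List.length_cons] at hf
    by_cases hc : c = '.'
    · rw [if_pos (by simp [List.isPrefixOf, hc])]
      simp only [List.drop_succ_cons, List.drop_zero]
      rw [ih f [] (cur.reverse :: acc) (by omega)]
      simp [pvSplit, hc, pvSplit_headI_tail]
    · rw [if_neg (by simp [List.isPrefixOf]; exact fun h => (hc h.symm).elim)]
      rw [ih f (c :: cur) acc (by omega)]
      simp [pvSplit, hc]

theorem pvSplitOn_eq (cs : List Char) : PySem.Chars.splitOn cs ['.'] = pvSplit cs := by
  rw [PySem.Chars.splitOn, pvSplitGo_eq cs (cs.length + 1) [] [] (by omega)]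
  simp [pvSplit_headI_tail]

theorem pvSplit_no_dot {cs : List Char} (h : '.' ∉ cs) : pvSplit cs = [cs] := by
  induction cs with
  | nil => rfl
  | cons c t ih =>
    simp only [List.mem_cons, not_or] at h
    simp [pvSplit, Ne.symm h.1, ih h.2]

theorem pvSplit_dot (pre rest : List Char) (h : '.' ∉ pre) :
    pvSplit (pre ++ '.' :: rest) = pre :: pvSplit rest := by
  induction pre with
  | nil => simp [pvSplit]
  | cons c p' ih =>
    simp only [List.mem_cons, not_or] at h
    simp [pvSplit, Ne.symm h.1, ih h.2]

theorem pvFind_eq_coe {s sub : List Char} {j : ℕ} (h1 : sub <+: s.drop j)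
    (h2 : ∀ i < j, ¬ sub <+: s.drop i) : PySem.Chars.find s sub = (j : ℤ) := by
  have hin : PySem.Chars.isIn sub s = true :=
    (PySem.Chars.exists_prefix_drop_iff_isIn sub s).mp ⟨j, h1⟩
  have h0 : 0 ≤ PySem.Chars.find s sub :=
    (PySem.Chars.find_nonneg_iff s sub).mpr ((PySem.Chars.isIn_iff_infix sub s).mp hin)
  obtain ⟨hp, hmin⟩ := PySem.Chars.find_spec h0
  rcases lt_trichotomy (PySem.Chars.find s sub).toNat j with hlt | heq | hgt
  · exact absurd hp (h2 _ hlt)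
  · rw [← Int.toNat_of_nonneg h0, heq]
  · exact absurd h1 (hmin j hgt)

theorem pvPrefix_split {mm : List Char} (a b : List Char) (hdot : '.' ∉ mm) {i : ℕ}
    (h : mm <+: (a ++ '.' :: b).drop i) :
    (i + mm.length ≤ a.length ∧ mm <+: a.drop i) ∨
      (a.length + 1 ≤ i ∧ mm <+: b.drop (i - (a.length + 1))) := by
  by_cases hi : a.length + 1 ≤ i
  · right
    refine ⟨hi, ?_⟩
    have hd : (a ++ '.' :: b).drop i = b.drop (i - (a.length + 1)) := by
      rw [List.drop_append, List.drop_eq_nil_of_le (by omega), List.nil_append,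
        (by omega : i - a.length = (i - (a.length + 1)) + 1), List.drop_succ_cons]
    rwa [hd] at h
  · push_neg at hi
    have hdrop : (a ++ '.' :: b).drop i = a.drop i ++ '.' :: b := by
      rw [List.drop_append, Nat.sub_eq_zero_of_le (by omega), List.drop_zero]
    rw [hdrop] at h
    by_cases hlen : i + mm.length ≤ a.length
    · left
      refine ⟨hlen, ?_⟩
      rw [List.prefix_iff_eq_take] at h
      rw [List.take_append, Nat.sub_eq_zero_of_le (by rw [List.length_drop]; omega),
        List.take_zero, List.append_nil] at h
      exact List.prefix_iff_eq_take.mpr h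
    · exfalso
      apply hdot
      push_neg at hlen
      have hk : a.length - i < mm.length := by omega
      have hg := h.getElem hk
      rw [List.getElem_append_right (by rw [List.length_drop])] at hg
      simp only [List.length_drop, Nat.sub_self, List.getElem_cons_zero] at hg
      exact hg ▸ List.getElem_mem hk

theorem pvLowerChar_eq_dot {c : Char} (h : PySem.Chars.lowerChar c = '.') : c = '.' := by
  by_contra hc
  rw [PySem.Chars.lowerChar] at h
  split_ifs at h with hu
  · simp only [PySem.Chars.isupper, Bool.and_eq_true, decide_eq_true_eq, Char.le_def,
      UInt32.le_iff_toNat_le] at hu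
    have e1 : ('A'.val.toNat) = 65 := by decide
    have e2 : ('Z'.val.toNat) = 90 := by decide
    have e3 : c.toNat = c.val.toNat := rfl
    have hZ : c.toNat ≤ 90 := by omega
    have h46 : c.toNat + 32 = 46 := by
      have h2 := congrArg Char.toNat h
      rw [Char.toNat_ofNat, if_pos (Or.inl (by omega))] at h2
      have e4 : ('.' : Char).toNat = 46 := by decide
      omega
    omega
  · exact hc h

theorem pvLower_append_dot (pre rest : List Char) :
    PySem.Chars.lower (pre ++ '.' :: rest) =
      PySem.Chars.lower pre ++ '.' :: PySem.Chars.lower rest := by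
  simp only [PySem.Chars.lower, List.map_append, List.map_cons]
  rfl

theorem pvLower_length (l : List Char) : (PySem.Chars.lower l).length = l.length := by
  rw [PySem.Chars.lower, List.length_map]

theorem pvRfindFrom_eval (cs : List Char) (k : ℕ) (hk : k ≤ cs.length) :
    PySem.Chars.rfindFrom cs ['.'] 0 (some (k : ℤ)) = pvLastDot (cs.take k) := by
  rw [PySem.Chars.rfindFrom]
  simp only
  rw [if_neg (by omega : ¬ ((cs.length : ℤ) < (k : ℤ))),
    if_neg (by omega : ¬ ((k : ℤ) < 0)),
    if_neg (by omega : ¬ ((0 : ℤ) < 0))]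
  rw [if_neg (by omega : ¬ ((k : ℤ) < 0))]
  simp only [Int.toNat_natCast, Int.toNat_zero, List.drop_zero]
  rw [pvRfind_eq_lastDot]
  split_ifs with h <;> omega

theorem pvSlice_eval (cs : List Char) (a b : ℤ) (ha : 0 ≤ a) (han : a ≤ cs.length)
    (hb : 0 ≤ b) (hbn : b ≤ cs.length) :
    PySem.Chars.slice cs (some a) (some b) = (cs.take b.toNat).drop a.toNat := by
  rw [PySem.Chars.slice_eq_listSlice, PySem.List.slice]
  simp only [PySem.List.clampIdx]
  rw [if_neg (by omega), if_neg (by omega)]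
  have h1 : min a.toNat cs.length = a.toNat := by omega
  have h2 : min b.toNat cs.length = b.toNat := by omega
  rw [h1, h2, ← List.drop_take]

theorem pvLower_not_dot {pre : List Char} (h : '.' ∉ pre) : '.' ∉ PySem.Chars.lower pre := by
  intro hm
  rw [PySem.Chars.lower] at hm
  obtain ⟨c, hc, he⟩ := List.mem_map.mp hm
  exact h (pvLowerChar_eq_dot he ▸ hc)

theorem pvDecomp (cs : List Char) (h : '.' ∈ cs) :
    ∃ pre rest, cs = pre ++ '.' :: rest ∧ '.' ∉ pre := by
  induction cs with
  | nil => cases h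
  | cons c t ih =>
    by_cases hc : c = '.'
    · exact ⟨[], t, by rw [hc]; rfl, by simp⟩
    · obtain ⟨p, r, he, hp⟩ := ih (by
        rcases List.mem_cons.mp h with h1 | h1
        · exact absurd h1.symm hc
        · exact h1)
      refine ⟨c :: p, r, by rw [List.cons_append, he], ?_⟩
      intro hm
      rcases List.mem_cons.mp hm with h1 | h1
      · exact hc h1.symm
      · exact hp h1

theorem pvTake_lift (pre rest : List Char) (k : ℕ) :
    (pre ++ '.' :: rest).take (pre.length + 1 + k) = pre ++ '.' :: rest.take k := by
  rw [List.take_append, List.take_of_length_le (by omega),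
    (by omega : pre.length + 1 + k - pre.length = k + 1), List.take_succ_cons]

theorem pvDrop_lift (pre rest : List Char) (k : ℕ) :
    (pre ++ '.' :: rest).drop (pre.length + 1 + k) = rest.drop k := by
  rw [List.drop_append, List.drop_eq_nil_of_le (by omega), List.nil_append,
    (by omega : pre.length + 1 + k - pre.length = k + 1), List.drop_succ_cons]

theorem pvSliceLift (pre rest : List Char) (E S : ℕ) :
    ((pre ++ '.' :: rest).take (pre.length + 1 + E)).drop (pre.length + 1 + S) =
      (rest.take E).drop S := by
  rw [pvTake_lift]
  exact pvDrop_lift pre (rest.take E) S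

theorem pvExtract_lift (pre rest : List Char) (k : ℕ) :
    pvExtract (pre ++ '.' :: rest) (pre.length + 1 + k) = pvExtract rest k := by
  simp only [pvExtract]
  rw [pvTake_lift, pvDrop_lift pre rest k, pvLastDot_append]
  obtain ⟨hu1, hu2⟩ := pvLastDot_bounds (rest.take k)
  have hul : (rest.take k).length ≤ k := by simp
  have hfd := PySem.Chars.neg_one_le_find (rest.drop k) ['.']
  have hfdle := PySem.Chars.find_le_length (rest.drop k) ['.']
  rw [List.length_drop] at hfdle
  by_cases hLD : pvLastDot (rest.take k) = -1 <;>
    by_cases hfneg : PySem.Chars.find (rest.drop k) ['.'] = -1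
  · rw [if_pos hLD, if_pos hfneg]
    have h1 : ((pre.length : ℤ) + 1).toNat = pre.length + 1 + ((-1 : ℤ) + 1).toNat := by omega
    have h2 : (pre ++ '.' :: rest).length = pre.length + 1 + rest.length := by
      rw [List.length_append, List.length_cons]; omega
    rw [hLD, h1, h2, pvSliceLift, if_pos hfneg]
  · rw [if_pos hLD, if_neg hfneg]
    have h1 : ((pre.length : ℤ) + 1).toNat = pre.length + 1 + ((-1 : ℤ) + 1).toNat := by omega
    have h2 : pre.length + 1 + k + (PySem.Chars.find (rest.drop k) ['.']).toNat =
        pre.length + 1 + (k + (PySem.Chars.find (rest.drop k) ['.']).toNat) := by omega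
    rw [hLD, h1, h2, pvSliceLift, if_neg hfneg]
  · rw [if_neg hLD, if_pos hfneg]
    have h1 : ((pre.length : ℤ) + 1 + pvLastDot (rest.take k) + 1).toNat =
        pre.length + 1 + (pvLastDot (rest.take k) + 1).toNat := by omega
    have h2 : (pre ++ '.' :: rest).length = pre.length + 1 + rest.length := by
      rw [List.length_append, List.length_cons]; omega
    rw [h1, h2, pvSliceLift, if_pos hfneg]
  · rw [if_neg hLD, if_neg hfneg]
    have h1 : ((pre.length : ℤ) + 1 + pvLastDot (rest.take k) + 1).toNat =
        pre.length + 1 + (pvLastDot (rest.take k) + 1).toNat := by omega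
    have h2 : pre.length + 1 + k + (PySem.Chars.find (rest.drop k) ['.']).toNat =
        pre.length + 1 + (k + (PySem.Chars.find (rest.drop k) ['.']).toNat) := by omega
    rw [h1, h2, pvSliceLift, if_neg hfneg]

theorem pvMaster_nodot (mm : List Char) (cs : List Char) (hcs : '.' ∉ cs) :
    pvCharA mm cs = pvHit mm (pvSplit cs) := by
  rw [pvSplit_no_dot hcs]
  by_cases hin : PySem.Chars.isIn mm (PySem.Chars.lower cs) = true
  · rw [pvCharA, if_pos hin]
    have h1 : pvLastDot (cs.take (PySem.Chars.find (PySem.Chars.lower cs) mm).toNat) = -1 :=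
      pvLastDot_of_not_mem (fun hm => hcs (List.mem_of_mem_take hm))
    have h2 : PySem.Chars.find
        (cs.drop (PySem.Chars.find (PySem.Chars.lower cs) mm).toNat) ['.'] = -1 := by
      rw [PySem.Chars.find_eq_neg_one_iff]
      intro hinf
      exact hcs (List.mem_of_mem_drop (hinf.mem (by simp)))
    simp only [pvExtract, h1, h2, pvHit, hin, if_pos]
    norm_num
  · simp only [Bool.not_eq_true] at hin
    simp [pvCharA, pvHit, hin]

-- MASTER: A's per-marker step returns exactly the first sentence of split('.') containing the marker
theorem pvMaster (mm : List Char) (hne : mm ≠ []) (hdot : '.' ∉ mm) (cs : List Char) :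
    pvCharA mm cs = pvHit mm (pvSplit cs) := by
  suffices H : ∀ n (cs : List Char), cs.length ≤ n → pvCharA mm cs = pvHit mm (pvSplit cs) from
    H cs.length cs le_rfl
  intro n
  induction n with
  | zero =>
    intro cs hcs
    have h0 : cs = [] := List.length_eq_zero_iff.mp (by omega)
    subst h0
    exact pvMaster_nodot mm [] (by simp)
  | succ n ihn =>
    intro cs hcs
    by_cases hmem : '.' ∈ cs
    · obtain ⟨pre, rest, rfl, hpre⟩ := pvDecomp cs hmem
      have hrest : rest.length ≤ n := by
        rw [List.length_append, List.length_cons] at hcs; omega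
      have hlow := pvLower_append_dot pre rest
      have hLPdot : '.' ∉ PySem.Chars.lower pre := pvLower_not_dot hpre
      have hLPlen : (PySem.Chars.lower pre).length = pre.length := pvLower_length pre
      have hmmlen : mm.length ≠ 0 := fun h0 => hne (List.length_eq_zero_iff.mp h0)
      rw [pvSplit_dot pre rest hpre]
      by_cases hinpre : PySem.Chars.isIn mm (PySem.Chars.lower pre) = true
      · -- marker occurs in the first sentence: A extracts exactly `pre`
        have hFP0 : 0 ≤ PySem.Chars.find (PySem.Chars.lower pre) mm := by
          rw [PySem.Chars.isIn, bne_iff_ne] at hinpre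
          have := PySem.Chars.neg_one_le_find (PySem.Chars.lower pre) mm
          omega
        obtain ⟨hp, hmin⟩ := PySem.Chars.find_spec hFP0
        set j := (PySem.Chars.find (PySem.Chars.lower pre) mm).toNat with hj
        have hple := hp.length_le
        rw [List.length_drop] at hple
        have hjb : j + mm.length ≤ pre.length := by rw [← hLPlen]; omega
        have hfind_cs : PySem.Chars.find (PySem.Chars.lower (pre ++ '.' :: rest)) mm = (j : ℤ) := by
          rw [hlow]
          apply pvFind_eq_coe
          · rw [List.drop_append, Nat.sub_eq_zero_of_le (by omega), List.drop_zero]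
            exact hp.trans (List.prefix_append _ _)
          · intro i hi hcon
            rcases pvPrefix_split _ _ hdot hcon with ⟨_, hpref⟩ | ⟨hge, _⟩
            · exact hmin i hi hpref
            · omega
        have hin_cs : PySem.Chars.isIn mm (PySem.Chars.lower (pre ++ '.' :: rest)) = true := by
          rw [PySem.Chars.isIn, hfind_cs]
          simp only [bne_iff_ne, ne_eq]
          omega
        rw [pvCharA, if_pos hin_cs, hfind_cs, Int.toNat_natCast]
        simp only [pvHit, hinpre, if_true]
        apply congrArg some
        have htake : (pre ++ '.' :: rest).take j = pre.take j := by
          rw [List.take_append, Nat.sub_eq_zero_of_le (by omega), List.take_zero, List.append_nil]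
        have hLD : pvLastDot ((pre ++ '.' :: rest).take j) = -1 := by
          rw [htake]
          exact pvLastDot_of_not_mem (fun hm => hpre (List.mem_of_mem_take hm))
        have hdropj : (pre ++ '.' :: rest).drop j = pre.drop j ++ '.' :: rest := by
          rw [List.drop_append, Nat.sub_eq_zero_of_le (by omega), List.drop_zero]
        have hfdj : PySem.Chars.find ((pre ++ '.' :: rest).drop j) ['.'] =
            ((pre.length - j : ℕ) : ℤ) := by
          rw [hdropj]
          apply pvFind_eq_coe
          · have hn : pre.length - j = (pre.drop j).length := (List.length_drop).symm
            rw [hn, List.drop_append, List.drop_length, List.nil_append, Nat.sub_self,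
              List.drop_zero]
            exact (pvDotPrefix_iff _).mpr rfl
          · intro i hi hcon
            rw [List.drop_append, Nat.sub_eq_zero_of_le (by rw [List.length_drop]; omega),
              List.drop_zero, pvDotPrefix_iff, List.drop_drop] at hcon
            have hlt' : j + i < pre.length := by omega
            have hnn : pre.drop (j + i) ≠ [] := by
              intro h0
              have := congrArg List.length h0
              rw [List.length_drop] at this
              simp at this
              omega
            rw [List.head?_append_of_ne_nil _ hnn, List.head?_drop,
              List.getElem?_eq_getElem hlt'] at hcon
            exact hpre ((Option.some_inj.mp hcon) ▸ List.getElem_mem hlt')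
        simp only [pvExtract, hLD, hfdj]
        norm_num
        rw [if_neg (by omega : ¬ ((pre.length - j : ℕ) : ℤ) = -1),
          (by omega : j + (pre.length - j) = pre.length)]
        exact List.take_left
      · -- marker not in the first sentence: A's step on cs equals A's step on rest
        have hiff : PySem.Chars.isIn mm (PySem.Chars.lower (pre ++ '.' :: rest)) =
            PySem.Chars.isIn mm (PySem.Chars.lower rest) := by
          rw [Bool.eq_iff_iff]
          constructor
          · intro hin
            obtain ⟨i, hp⟩ := (PySem.Chars.exists_prefix_drop_iff_isIn mm _).mpr hin
            rw [hlow] at hp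
            rcases pvPrefix_split _ _ hdot hp with ⟨_, hpref⟩ | ⟨hge, hpref⟩
            · exact absurd ((PySem.Chars.exists_prefix_drop_iff_isIn mm _).mp ⟨i, hpref⟩) hinpre
            · exact (PySem.Chars.exists_prefix_drop_iff_isIn mm _).mp ⟨_, hpref⟩
          · intro hin
            obtain ⟨k, hp⟩ := (PySem.Chars.exists_prefix_drop_iff_isIn mm _).mpr hin
            apply (PySem.Chars.exists_prefix_drop_iff_isIn mm _).mp
            refine ⟨(PySem.Chars.lower pre).length + 1 + k, ?_⟩
            rw [hlow, pvDrop_lift]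
            exact hp
        have hstep : pvCharA mm (pre ++ '.' :: rest) = pvCharA mm rest := by
          by_cases hin : PySem.Chars.isIn mm (PySem.Chars.lower rest) = true
          · have hFR0 : 0 ≤ PySem.Chars.find (PySem.Chars.lower rest) mm := by
              rw [PySem.Chars.isIn, bne_iff_ne] at hin
              have := PySem.Chars.neg_one_le_find (PySem.Chars.lower rest) mm
              omega
            obtain ⟨hp, hmin⟩ := PySem.Chars.find_spec hFR0
            set j' := (PySem.Chars.find (PySem.Chars.lower rest) mm).toNat with hj'
            have hple := hp.length_le
            rw [List.length_drop] at hple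
            have hLRlen : (PySem.Chars.lower rest).length = rest.length := pvLower_length rest
            have hjb' : j' + mm.length ≤ rest.length := by rw [← hLRlen]; omega
            have hfind_cs : PySem.Chars.find (PySem.Chars.lower (pre ++ '.' :: rest)) mm =
                ((pre.length + 1 + j' : ℕ) : ℤ) := by
              rw [hlow]
              apply pvFind_eq_coe
              · have h' : (PySem.Chars.lower pre ++ '.' :: PySem.Chars.lower rest).drop
                    (pre.length + 1 + j') = (PySem.Chars.lower rest).drop j' := by
                  rw [← hLPlen]
                  exact pvDrop_lift _ _ _
                rw [h']
                exact hp
              · intro i hi hcon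
                rcases pvPrefix_split _ _ hdot hcon with ⟨_, hpref⟩ | ⟨hge, hpref⟩
                · exact absurd
                    ((PySem.Chars.exists_prefix_drop_iff_isIn mm _).mp ⟨i, hpref⟩) hinpre
                · rw [hLPlen] at hge hpref
                  exact hmin (i - (pre.length + 1)) (by omega) hpref
            have hin_cs : PySem.Chars.isIn mm (PySem.Chars.lower (pre ++ '.' :: rest)) = true := by
              rw [hiff]
              exact hin
            rw [pvCharA, if_pos hin_cs, pvCharA, if_pos hin, hfind_cs, Int.toNat_natCast,
              pvExtract_lift]
          · have hin_cs : ¬ PySem.Chars.isIn mm (PySem.Chars.lower (pre ++ '.' :: rest)) = true := by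
              rw [hiff]
              exact hin
            simp only [Bool.not_eq_true] at hin hin_cs
            simp [pvCharA, hin, hin_cs]
        rw [hstep, ihn rest hrest]
        simp [pvHit, hinpre]
    · exact pvMaster_nodot mm cs hmem

theorem pvTryMarker_eq (analysis m : String) (hne : m.toList ≠ []) (hdot : '.' ∉ m.toList) :
    pvTryMarker analysis m =
      Option.map (fun p => String.ofList (PySem.Chars.strip p))
        (pvHit m.toList (pvSplit analysis.toList)) := by
  rw [← pvMaster m.toList hne hdot analysis.toList]
  have hcond : PySem.Str.isIn m (PySem.Str.lower analysis) =
      PySem.Chars.isIn m.toList (PySem.Chars.lower analysis.toList) := by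
    rw [PySem.Str.isIn_eq, PySem.Str.toList_lower]
  by_cases hin : PySem.Chars.isIn m.toList (PySem.Chars.lower analysis.toList) = true
  · rw [pvTryMarker, if_pos (by rw [hcond]; exact hin), pvCharA, if_pos hin]
    have hF0 : 0 ≤ PySem.Chars.find (PySem.Chars.lower analysis.toList) m.toList := by
      rw [PySem.Chars.isIn, bne_iff_ne] at hin
      have := PySem.Chars.neg_one_le_find (PySem.Chars.lower analysis.toList) m.toList
      omega
    have hFn : PySem.Chars.find (PySem.Chars.lower analysis.toList) m.toList ≤
        (analysis.toList.length : ℤ) := by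
      have := PySem.Chars.find_le_length (PySem.Chars.lower analysis.toList) m.toList
      rwa [pvLower_length] at this
    set cs := analysis.toList with hcs
    set j := (PySem.Chars.find (PySem.Chars.lower cs) m.toList).toNat with hj
    have hFj : PySem.Chars.find (PySem.Chars.lower cs) m.toList = (j : ℤ) := by omega
    have hjn : j ≤ cs.length := by omega
    have hfindStr : PySem.Str.find (PySem.Str.lower analysis) m = (j : ℤ) := by
      rw [PySem.Str.find_eq, PySem.Str.toList_lower, ← hcs, hFj]
    simp only [hfindStr]
    have hstart : PySem.Str.rfindFrom analysis "." 0 (some (j : ℤ)) = pvLastDot (cs.take j) := by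
      rw [PySem.Str.rfindFrom_eq, ← hcs, (by rfl : ("." : String).toList = ['.']),
        pvRfindFrom_eval cs j hjn]
    obtain ⟨hL1, hL2⟩ := pvLastDot_bounds (cs.take j)
    have hLt : (cs.take j).length ≤ j := by simp
    have hfd := PySem.Chars.neg_one_le_find (cs.drop j) ['.']
    have hfdle := PySem.Chars.find_le_length (cs.drop j) ['.']
    rw [List.length_drop] at hfdle
    have he0 : PySem.Str.findFrom analysis "." (j : ℤ) =
        if PySem.Chars.find (cs.drop j) ['.'] = -1 then -1
        else (j : ℤ) + PySem.Chars.find (cs.drop j) ['.'] := by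
      rw [PySem.Str.findFrom_eq, ← hcs, (by rfl : ("." : String).toList = ['.']),
        PySem.Chars.findFrom_natCast cs ['.'] j hjn]
    apply congrArg some
    apply String.toList_inj.mp
    rw [String.toList_ofList, PySem.Str.toList_strip]
    apply congrArg PySem.Chars.strip
    rw [PySem.Str.toList_slice, ← hcs, PySem.Str.len_eq, ← hcs]
    simp only [pvExtract]
    by_cases hfdneg : PySem.Chars.find (cs.drop j) ['.'] = -1
    · have he0' : PySem.Str.findFrom analysis "." (j : ℤ) = -1 := by rw [he0, if_pos hfdneg]
      rw [hstart, he0', if_pos rfl, if_pos hfdneg]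
      rw [pvSlice_eval cs _ _ (by omega) (by omega) (by omega) (by omega)]
      congr 2
    · have he0' : PySem.Str.findFrom analysis "." (j : ℤ) =
          (j : ℤ) + PySem.Chars.find (cs.drop j) ['.'] := by rw [he0, if_neg hfdneg]
      rw [hstart, he0', if_neg (by omega), if_neg hfdneg]
      rw [pvSlice_eval cs _ _ (by omega) (by omega) (by omega) (by omega)]
      congr 2
      all_goals omega
  · rw [pvTryMarker, if_neg (by rw [hcond]; exact hin), pvCharA, if_neg hin]
    rfl

theorem pvSentences_eq (analysis : String) :
    (PySem.Str.split? analysis ".").getD [] = (pvSplit analysis.toList).map String.ofList := by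
  have hdot : ("." : String).toList = ['.'] := rfl
  rw [PySem.Str.split?, hdot, PySem.Chars.split?]
  simp [pvSplitOn_eq]

theorem pvStrip_ofList (p : List Char) :
    PySem.Str.strip (String.ofList p) = String.ofList (PySem.Chars.strip p) := by
  apply String.toList_inj.mp
  rw [PySem.Str.toList_strip, String.toList_ofList, String.toList_ofList]

theorem pvScanGen (m : String) (ps : List (List Char)) :
    pvScanSentences m (ps.map String.ofList) =
      Option.map (fun p => PySem.Str.strip (String.ofList p)) (pvHit m.toList ps) := by
  induction ps with
  | nil => rfl
  | cons p ps ih =>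
    simp only [List.map_cons, pvScanSentences, pvHit]
    have hcond : PySem.Str.isIn m (PySem.Str.lower (String.ofList p)) =
        PySem.Chars.isIn m.toList (PySem.Chars.lower p) := by
      rw [PySem.Str.isIn_eq, PySem.Str.toList_lower, String.toList_ofList]
    rw [hcond]
    by_cases hc : PySem.Chars.isIn m.toList (PySem.Chars.lower p) = true
    · simp [hc]
    · simp only [Bool.not_eq_true] at hc
      simp [hc, ih]

theorem pvLoops_eq (analysis : String) (ms : List String)
    (h : ∀ m ∈ ms, m.toList ≠ [] ∧ '.' ∉ m.toList) :
    pvLoopA analysis ms = pvLoopB ((PySem.Str.split? analysis ".").getD []) ms := by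
  induction ms with
  | nil => rfl
  | cons m ms ih =>
    obtain ⟨h1, h2⟩ := h m (List.mem_cons_self)
    simp only [pvLoopA, pvLoopB]
    rw [pvTryMarker_eq analysis m h1 h2, pvSentences_eq, pvScanGen,
      ih (fun x hx => h x (List.mem_cons_of_mem m hx)), pvSentences_eq]
    cases pvHit m.toList (pvSplit analysis.toList) with
    | none => rfl
    | some p => simp [pvStrip_ofList]

-- ===== VERDICT (by name: the statement is the Claim_ definition above) =====
theorem extract_insight_py_spec : Claim_equal_extract_insight_py := by
  intro analysis _
  show extract_insight_py analysis = extract_insight_py_alt analysis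
  have hnil : ((PySem.Str.split? analysis ".").getD []) ≠ [] := by
    rw [pvSentences_eq]
    intro h
    exact pvSplit_ne_nil analysis.toList (List.map_eq_nil_iff.mp h)
  simp only [extract_insight_py, extract_insight_py_alt]
  rw [pvLoops_eq analysis pvMarkers (by intro m hm; fin_cases hm <;> exact ⟨by decide, by decide⟩)]
  cases h : pvLoopB ((PySem.Str.split? analysis ".").getD []) pvMarkers with
  | some r => rfl
  | none => simp only [if_pos hnil]
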